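-- pv_equiv track=rewrite | github.com/bakunobu/exercise | 1400_basic_tasks/chap_9/ex_9_24.py | find_min_num_div
-- ===== SOURCE A (Python) =====
-- def find_min_num_div(div_counter:dict) -> int:
--     nums = []
--     num_divs = []
--     for k, v in sorted(div_counter.items()):
--         nums.append(k)
--         num_divs.append(v)
--     max_div = max(num_divs)
--
--     max_divs = [key for key in div_counter.keys() if div_counter[key] == max_div]
--     return(min(max_divs))
-- ===== SOURCE B (Python) =====
-- def find_min_num_div(div_counter: dict) -> int:
--     # one pass: keep the pair with the largest value, breaking ties by the smaller key
--     it = iter(div_counter.items())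
--     best_k, best_v = next(it)
--     for k, v in it:
--         if v > best_v or (v == best_v and k < best_k):
--             best_k, best_v = k, v
--     return best_k
-- ===== Notes on version B (the rewrite author's own statement) =====
-- stated objective: faster
-- what changed: Replaces A's sort of the items plus two parallel appended lists, a max() scan and a filter-then-min() re-scan by a single fold over the items that keeps the (max value, min key) pair.
import Mathlib
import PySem

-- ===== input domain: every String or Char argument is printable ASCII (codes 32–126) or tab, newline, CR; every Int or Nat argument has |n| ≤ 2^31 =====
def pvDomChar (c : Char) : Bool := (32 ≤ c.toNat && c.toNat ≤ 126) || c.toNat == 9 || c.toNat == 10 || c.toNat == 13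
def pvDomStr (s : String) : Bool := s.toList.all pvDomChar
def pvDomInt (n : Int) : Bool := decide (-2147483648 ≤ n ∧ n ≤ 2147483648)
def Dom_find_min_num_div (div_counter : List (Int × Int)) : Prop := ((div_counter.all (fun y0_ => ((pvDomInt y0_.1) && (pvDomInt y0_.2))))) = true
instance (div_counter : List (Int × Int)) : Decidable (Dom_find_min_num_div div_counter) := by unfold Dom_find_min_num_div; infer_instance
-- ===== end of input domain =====

-- ===== PORT A =====
-- port of A: sort the items, build the parallel nums/num_divs lists, max of values,
-- filter the keys by lookup == max, min of those keys
def find_min_num_div (div_counter : List (Int × Int)) : Int :=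
  let sorted_items := PySem.List.sorted2 div_counter Prod.fst Prod.snd
  let st := sorted_items.foldl (fun acc p => (acc.1 ++ [p.1], acc.2 ++ [p.2])) ([], [])
  let max_div := (PySem.List.max? st.2 (fun v => v)).getD 0   -- max(num_divs); Pre_ excludes the empty dict (ValueError)
  let max_divs := (div_counter.map Prod.fst).foldl
    (fun acc k => if (PySem.Dict.mk div_counter).getD k 0 == max_div then acc ++ [k] else acc) []
  (PySem.List.min? max_divs (fun k => k)).getD 0              -- min(max_divs)

-- ===== PORT B =====
-- the body of B's loop: replace the best pair on a larger value, or on an equal value and a smaller key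
def pvStep (best q : Int × Int) : Int × Int :=
  if best.2 < q.2 || (q.2 == best.2 && q.1 < best.1) then q else best

-- port of B: one fold keeping the pair with the largest value, ties broken by the smaller key
def find_min_num_div_alt (div_counter : List (Int × Int)) : Int :=
  match div_counter with
  | [] => 0   -- Python B raises StopIteration here; excluded by Pre_
  | p :: rest => (rest.foldl pvStep p).1

-- ===== PRECONDITION & SPEC =====
-- Pre_ excludes the empty dict (A raises ValueError there) and lists whose keys repeat
-- (a Python dict argument cannot contain duplicate keys, so such lists represent no dict input of A).
def Pre_find_min_num_div (div_counter : List (Int × Int)) : Prop :=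
  div_counter ≠ [] ∧ (div_counter.map Prod.fst).Nodup
instance (div_counter : List (Int × Int)) : Decidable (Pre_find_min_num_div div_counter) := by
  unfold Pre_find_min_num_div; infer_instance
def pvWitness_find_min_num_div : (List (Int × Int)) := [(2, 4), (1, 4), (3, 2)]
def Spec_find_min_num_div (div_counter : List (Int × Int)) (out : Int) : Prop := out = find_min_num_div_alt div_counter
instance (div_counter : List (Int × Int)) (out : Int) : Decidable (Spec_find_min_num_div div_counter out) := by unfold Spec_find_min_num_div; infer_instance

-- ===== CLAIM (what is proved, stated in full; the proofs are below) =====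
def Claim_equal_find_min_num_div : Prop := ∀ (div_counter : List (Int × Int)), Dom_find_min_num_div div_counter → Pre_find_min_num_div div_counter → Spec_find_min_num_div div_counter (find_min_num_div div_counter)

-- ===== LEMMAS AND PROOFS =====

-- max()/min() of an Int list returns THE maximum/minimum value (unique by antisymmetry)
lemma pv_max_unique (xs : List Int) (m : Int) (hm : m ∈ xs) (hb : ∀ y ∈ xs, y ≤ m) :
    PySem.List.max? xs (fun v => v) = some m := by
  cases hx : PySem.List.max? xs (fun v => v) with
  | none =>
    rw [PySem.List.max?_eq_none_iff] at hx
    simp [hx] at hm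
  | some m' =>
    have h1 : m' ≤ m := hb _ (PySem.List.max?_mem hx)
    have h2 : m ≤ m' := PySem.List.max?_isMax hx m hm
    exact congrArg some (le_antisymm h2 h1).symm

lemma pv_min_unique (xs : List Int) (m : Int) (hm : m ∈ xs) (hb : ∀ y ∈ xs, m ≤ y) :
    PySem.List.min? xs (fun v => v) = some m := by
  cases hx : PySem.List.min? xs (fun v => v) with
  | none =>
    rw [PySem.List.min?_eq_none_iff] at hx
    simp [hx] at hm
  | some m' =>
    have h1 : m ≤ m' := hb _ (PySem.List.min?_mem hx)
    have h2 : m' ≤ m := PySem.List.min?_isMin hx m hm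
    exact congrArg some (le_antisymm h2 h1)

lemma pvStep_cases (p x : Int × Int) : pvStep p x = x ∨ pvStep p x = p := by
  unfold pvStep; split <;> simp

lemma pvStep_max (p x : Int × Int) : p.2 ≤ (pvStep p x).2 ∧ x.2 ≤ (pvStep p x).2 := by
  unfold pvStep
  by_cases h : (decide (p.2 < x.2) || (x.2 == p.2 && decide (x.1 < p.1))) = true
  · simp only [if_pos h]
    simp only [Bool.or_eq_true, decide_eq_true_eq, Bool.and_eq_true, beq_iff_eq] at h
    rcases h with h | ⟨h1, h2⟩ <;> exact ⟨by omega, by omega⟩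
  · simp only [if_neg h]
    simp only [Bool.or_eq_true, decide_eq_true_eq, Bool.and_eq_true, beq_iff_eq] at h
    have hle : ¬ p.2 < x.2 := fun hh => h (Or.inl hh)
    exact ⟨le_refl _, by omega⟩

lemma pvStep_min (p x q : Int × Int) (hq : q = p ∨ q = x) (hv : q.2 = (pvStep p x).2) :
    (pvStep p x).1 ≤ q.1 := by
  unfold pvStep at hv ⊢
  by_cases h : (decide (p.2 < x.2) || (x.2 == p.2 && decide (x.1 < p.1))) = true
  · simp only [if_pos h] at hv ⊢
    simp only [Bool.or_eq_true, decide_eq_true_eq, Bool.and_eq_true, beq_iff_eq] at h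
    rcases hq with rfl | rfl
    · rcases h with h | ⟨h1, h2⟩ <;> omega
    · omega
  · simp only [if_neg h] at hv ⊢
    simp only [Bool.or_eq_true, decide_eq_true_eq, Bool.and_eq_true, beq_iff_eq] at h
    rcases hq with rfl | rfl
    · omega
    · by_cases hlt : q.1 < p.1
      · exact absurd (Or.inr ⟨hv, hlt⟩) h
      · omega

-- B's fold returns an element of the list whose value is maximal and, among
-- the maximal-value elements, whose key is minimal
lemma pv_fold_facts (rest : List (Int × Int)) (p : Int × Int) :
    rest.foldl pvStep p ∈ p :: rest ∧
    (∀ q ∈ p :: rest, q.2 ≤ (rest.foldl pvStep p).2) ∧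
    (∀ q ∈ p :: rest, q.2 = (rest.foldl pvStep p).2 → (rest.foldl pvStep p).1 ≤ q.1) := by
  induction rest generalizing p with
  | nil =>
    refine ⟨by simp, ?_, ?_⟩ <;> intro q hq <;>
      rcases List.mem_cons.mp hq with rfl | hq <;> simp_all
  | cons x t ih =>
    simp only [List.foldl_cons]
    obtain ⟨ihmem, ihmax, ihmin⟩ := ih (pvStep p x)
    refine ⟨?_, ?_, ?_⟩
    · rcases List.mem_cons.mp ihmem with h | h
      · rcases pvStep_cases p x with h2 | h2 <;> rw [h, h2] <;> simp
      · simp [h]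
    · intro q hq
      rcases List.mem_cons.mp hq with rfl | hq
      · exact le_trans (pvStep_max q x).1 (ihmax _ List.mem_cons_self)
      · rcases List.mem_cons.mp hq with rfl | hq
        · exact le_trans (pvStep_max p q).2 (ihmax _ List.mem_cons_self)
        · exact ihmax q (List.mem_cons_of_mem _ hq)
    · intro q hq hv
      have key : (q = p ∨ q = x) → (t.foldl pvStep (pvStep p x)).1 ≤ q.1 := by
        intro hpx
        have hstep_le : (pvStep p x).2 ≤ (t.foldl pvStep (pvStep p x)).2 :=
          ihmax _ List.mem_cons_self
        have hq2 : q.2 ≤ (pvStep p x).2 := by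
          rcases hpx with rfl | rfl
          · exact (pvStep_max q x).1
          · exact (pvStep_max p q).2
        have hq2' : q.2 = (pvStep p x).2 := by omega
        exact le_trans (ihmin _ List.mem_cons_self (by omega))
          (pvStep_min p x q hpx hq2')
      rcases List.mem_cons.mp hq with rfl | hq
      · exact key (Or.inl rfl)
      · rcases List.mem_cons.mp hq with rfl | hq
        · exact key (Or.inr rfl)
        · exact ihmin q (List.mem_cons_of_mem _ hq) hv

-- ===== VERDICT (by name: the statement is the Claim_ definition above) =====
theorem find_min_num_div_spec : Claim_equal_find_min_num_div := by
  intro l _ hpre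
  obtain ⟨hne, hnd⟩ := hpre
  cases l with
  | nil => exact absurd rfl hne
  | cons p rest =>
  obtain ⟨hmem, hmax, hmin⟩ := pv_fold_facts rest p
  set r := rest.foldl pvStep p with hr
  show find_min_num_div (p :: rest) = r.1
  have hperm : (PySem.List.sorted2 (p :: rest) Prod.fst Prod.snd).Perm (p :: rest) :=
    PySem.List.sorted2_perm (p :: rest) Prod.fst Prod.snd false
  simp only [find_min_num_div]
  rw [PySem.List.foldl_prod_mk (f := fun (a : List Int) (e : Int × Int) => a ++ [e.1])
      (g := fun (a : List Int) (e : Int × Int) => a ++ [e.2]),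
      PySem.List.foldl_append_singleton_eq_map, PySem.List.foldl_append_singleton_eq_map]
  have hmaxv : PySem.List.max?
      ((PySem.List.sorted2 (p :: rest) Prod.fst Prod.snd).map Prod.snd) (fun v => v)
      = some r.2 := by
    apply pv_max_unique
    · exact List.mem_map_of_mem (hperm.mem_iff.mpr hmem)
    · intro y hy
      obtain ⟨q, hq, rfl⟩ := List.mem_map.mp hy
      exact hmax q (hperm.mem_iff.mp hq)
  simp only [List.nil_append, hmaxv, Option.getD_some]
  rw [PySem.List.foldl_append_if
      (p := fun k => (PySem.Dict.mk (p :: rest)).getD k 0 == r.2) (f := fun k => k)]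
  simp only [List.nil_append, List.map_id_fun', id]
  have hfil : (((p :: rest).map Prod.fst).filter
        (fun k => (PySem.Dict.mk (p :: rest)).getD k 0 == r.2))
      = ((p :: rest).filter (fun q => q.2 == r.2)).map Prod.fst := by
    rw [List.filter_map]
    congr 1
    apply List.filter_congr
    intro q hq
    have hlook : (PySem.Dict.mk (p :: rest)).getD q.1 0 = q.2 :=
      PySem.Dict.getD_of_mem_items (PySem.Dict.mk (p :: rest)) (k := q.1) (v := q.2)
        (by simpa using hq) (by simpa [PySem.Dict.keys_mk] using hnd) 0
    rw [Function.comp_apply, hlook]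
  rw [hfil]
  have hminv : PySem.List.min?
      (((p :: rest).filter (fun q => q.2 == r.2)).map Prod.fst) (fun k => k)
      = some r.1 := by
    apply pv_min_unique
    · exact List.mem_map_of_mem (List.mem_filter.mpr ⟨hmem, by simp⟩)
    · intro y hy
      obtain ⟨q, hq, rfl⟩ := List.mem_map.mp hy
      obtain ⟨hqmem, hqv⟩ := List.mem_filter.mp hq
      exact hmin q hqmem (by simpa using hqv)
  rw [hminv]
  rfl
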